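-- pv_equiv track=rewrite | github.com/ScamCast/python-misc | misc/dlive_scraper.py | batch_queries
-- ===== SOURCE A (Python) =====
-- def batch_queries(users, batch_size=8):
--     output = ""
--     queries = []
--     ticker = 0
--     num_users = len(users)
--
--     for user in users:
--
--         ticker += 1
--         num_users -= 1
--         output += f'{user}: userByDisplayName(displayname:"{user}")' + '''
--         {
--             id
--             username
--             displayname
--             avatar
--             offlineImage
--             partnerStatus
--             banStatus
--             deactivated
--             livestream {
--                 permlink
--                 title
--                 thumbnailUrl
--                 createdAt
--                 watchingCount
--                 view
--                 id
--             }
--             hostingLivestream {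
--                 creator {
--                     id
--                 }
--             }
--             followers {
--                 totalCount
--             }
--         }
--         '''
--         if ticker == batch_size or num_users == 0:
--             queries.append({'query': 'query{' + output + '}'})
--             output = ""
--             ticker = 0
--
--     return queries
-- ===== SOURCE B (Python) =====
-- _BLOCK = '''
--         {
--             id
--             username
--             displayname
--             avatar
--             offlineImage
--             partnerStatus
--             banStatus
--             deactivated
--             livestream {
--                 permlink
--                 title
--                 thumbnailUrl
--                 createdAt
--                 watchingCount
--                 view
--                 id
--             }
--             hostingLivestream {
--                 creator {
--                     id
--                 }
--             }
--             followers {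
--                 totalCount
--             }
--         }
--         '''
--
--
-- def _fragment(user):
--     return user + ': userByDisplayName(displayname:"' + user + '")' + _BLOCK
--
--
-- def batch_queries(users, batch_size=8):
--     if not users:
--         return []
--     # non-positive batch_size never triggers A's counter flush: one batch of everything
--     step = batch_size if batch_size > 0 else len(users)
--     queries = []
--     rest = users
--     while rest:
--         chunk, rest = rest[:step], rest[step:]
--         queries.append({'query': 'query{' + ''.join(_fragment(u) for u in chunk) + '}'})
--     return queries
-- ===== Notes on version B (the rewrite author's own statement) =====
-- stated objective: simpler
-- what changed: Replaces A's ticker/num_users counters and string accumulator flushed mid-loop by up-front chunking: slice the users into consecutive batches (one batch of everything for non-positive batch_size, matching A, whose counter flush never fires then) and join the constant per-user fragment per chunk.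
import Mathlib
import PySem

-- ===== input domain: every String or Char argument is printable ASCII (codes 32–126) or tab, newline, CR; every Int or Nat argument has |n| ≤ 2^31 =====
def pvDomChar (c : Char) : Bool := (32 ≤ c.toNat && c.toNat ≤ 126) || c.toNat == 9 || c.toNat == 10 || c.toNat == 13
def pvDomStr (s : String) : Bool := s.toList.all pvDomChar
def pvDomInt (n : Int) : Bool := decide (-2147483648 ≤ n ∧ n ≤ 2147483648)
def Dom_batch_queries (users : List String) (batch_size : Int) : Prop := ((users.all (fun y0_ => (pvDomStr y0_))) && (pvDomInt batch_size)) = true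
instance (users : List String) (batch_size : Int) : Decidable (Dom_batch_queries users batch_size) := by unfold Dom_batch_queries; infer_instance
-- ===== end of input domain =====

-- ===== PORT A =====
-- B restructures A: instead of running ticker/num_users counters and flushing an
-- accumulator, it slices the user list into chunks up front and joins each chunk
-- (objective: simpler decomposition, same cost).

-- the constant GraphQL block appended after every user (shared literal of both sources)
def pvBlock : String := "\n        {\n            id\n            username\n            displayname\n            avatar\n            offlineImage\n            partnerStatus\n            banStatus\n            deactivated\n            livestream {\n                permlink\n                title\n                thumbnailUrl\n                createdAt\n                watchingCount\n                view\n                id\n            }\n            hostingLivestream {\n                creator {\n                    id\n                }\n            }\n            followers {\n                totalCount\n            }\n        }\n        "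

-- the per-user string 'f'{user}: userByDisplayName(displayname:"{user}")' + BLOCK'
def pvFragment (user : String) : String :=
  user ++ ": userByDisplayName(displayname:\"" ++ user ++ "\")" ++ pvBlock

-- the for-loop of A, carrying (output, queries, ticker, num_users) exactly as A does
def batchQueriesLoop (batch_size : Int) :
    List String → String → List (List (String × String)) → Int → Int →
      List (List (String × String))
  | [], _output, queries, _ticker, _num => queries
  | user :: rest, output, queries, ticker, num =>
    let ticker' := ticker + 1
    let num' := num - 1
    let output' := output ++ pvFragment user
    if ticker' = batch_size ∨ num' = 0 then
      batchQueriesLoop batch_size rest ""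
        (queries ++ [[("query", "query{" ++ output' ++ "}")]]) 0 num'
    else
      batchQueriesLoop batch_size rest output' queries ticker' num'

def batch_queries (users : List String) (batch_size : Int) :
    List (List (String × String)) :=
  batchQueriesLoop batch_size users "" [] 0 (users.length : Int)

-- ===== PORT B =====
-- ''.join(_fragment(u) for u in chunk), ported by hand (exact: plain concatenation)
def pvFrags : List String → String
  | [] => ""
  | user :: rest => pvFragment user ++ pvFrags rest

-- Source B's while-loop: peel off rest[:step] / rest[step:]; the Nat parameter s is step-1
-- (Source B only runs the loop with step ≥ 1), which also makes termination evident
def batchQueriesChunks (s : Nat) : List String → List (List (String × String))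
  | [] => []
  | user :: rest =>
    [("query", "query{" ++ pvFrags ((user :: rest).take (s + 1)) ++ "}")] ::
      batchQueriesChunks s (rest.drop s)
termination_by l => l.length
decreasing_by simp

def batch_queries_alt (users : List String) (batch_size : Int) :
    List (List (String × String)) :=
  if users = [] then []
  else
    let step : Nat := if batch_size > 0 then batch_size.toNat else users.length
    batchQueriesChunks (step - 1) users

-- ===== PRECONDITION & SPEC =====
def Spec_batch_queries (users : List String) (batch_size : Int) (out : List (List (String × String))) : Prop := out = batch_queries_alt users batch_size
instance (users : List String) (batch_size : Int) (out : List (List (String × String))) : Decidable (Spec_batch_queries users batch_size out) := by unfold Spec_batch_queries; infer_instance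

-- ===== CLAIM (what is proved, stated in full; the proofs are below) =====
def Claim_equal_batch_queries : Prop := ∀ (users : List String) (batch_size : Int), Dom_batch_queries users batch_size → Spec_batch_queries users batch_size (batch_queries users batch_size)

-- ===== LEMMAS AND PROOFS =====

-- one step of Source B's chunking loop
theorem chunks_cons (s : Nat) (u : String) (rest : List String) :
    batchQueriesChunks s (u :: rest) =
      [("query", "query{" ++ pvFrags ((u :: rest).take (s + 1)) ++ "}")] ::
        batchQueriesChunks s (rest.drop s) := by
  rw [batchQueriesChunks]

-- non-positive batch_size: the ticker flush never fires (ticker' ≥ 1 > batch_size),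
-- so the whole remainder ends up in one batch, flushed at exhaustion
theorem loop_nonpos (batch_size : Int) (hbs : batch_size ≤ 0) :
    ∀ (rest : List String) (o : String) (qs : List (List (String × String))) (t : Int),
      rest ≠ [] → 0 ≤ t →
      batchQueriesLoop batch_size rest o qs t (rest.length : Int) =
        qs ++ [[("query", "query{" ++ o ++ pvFrags rest ++ "}")]] := by
  intro rest
  induction rest with
  | nil => intro o qs t h _; exact absurd rfl h
  | cons user tail ih =>
    intro o qs t _ ht
    cases tail with
    | nil =>
      simp [batchQueriesLoop, pvFrags, String.append_empty, String.append_assoc]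
    | cons v tail' =>
      have h1 : ¬ (t + 1 = batch_size ∨ ((((user :: v :: tail').length : Int)) - 1 = 0)) := by
        simp only [List.length_cons]
        push_cast
        omega
      rw [batchQueriesLoop, if_neg (by simpa using h1)]
      have hlen : (((user :: v :: tail').length : Int)) - 1 = (((v :: tail').length : Int)) := by
        simp
      rw [hlen, ih (o ++ pvFragment user) qs (t + 1) (by simp) (by omega)]
      simp [pvFrags, String.append_assoc]

-- positive batch_size: with t users already in the open batch (output o) and
-- num_users = rest.length, the loop emits o ++ the next (batch_size - t) users as the
-- first batch and then chunks the remainder batch_size at a time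
theorem loop_pos (batch_size : Int) (hbs : 0 < batch_size) :
    ∀ (rest : List String) (o : String) (qs : List (List (String × String))) (t : Int),
      rest ≠ [] → 0 ≤ t → t < batch_size →
      batchQueriesLoop batch_size rest o qs t (rest.length : Int) =
        qs ++ ([("query", "query{" ++ o ++ pvFrags (rest.take (batch_size - t).toNat) ++ "}")] ::
          batchQueriesChunks (batch_size.toNat - 1) (rest.drop (batch_size - t).toNat)) := by
  intro rest
  induction rest with
  | nil => intro o qs t h _ _; exact absurd rfl h
  | cons user tail ih =>
    intro o qs t _ ht htb
    have hk1 : 1 ≤ (batch_size - t).toNat := by omega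
    cases tail with
    | nil =>
      have htake : ([user].take (batch_size - t).toNat) = [user] := by
        apply List.take_of_length_le; simpa using hk1
      have hdrop : ([user].drop (batch_size - t).toNat) = [] := by
        apply List.drop_eq_nil_of_le; simpa using hk1
      simp [batchQueriesLoop, htake, hdrop, batchQueriesChunks, pvFrags,
        String.append_empty, String.append_assoc]
    | cons v tail' =>
      have hnum : (((user :: v :: tail').length : Int)) - 1 = (((v :: tail').length : Int)) := by
        simp
      by_cases hfl : t + 1 = batch_size
      · -- ticker flush: the open batch closes after this user
        rw [batchQueriesLoop]
        simp only [hnum]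
        rw [if_pos (Or.inl hfl)]
        rw [ih "" (qs ++ [[("query", "query{" ++ (o ++ pvFragment user) ++ "}")]]) 0
          (by simp) le_rfl hbs]
        have hk : (batch_size - t).toNat = 1 := by omega
        have hs : (batch_size - 0).toNat = batch_size.toNat - 1 + 1 := by omega
        rw [hk, hs]
        simp [chunks_cons, pvFrags, String.append_empty, String.append_assoc,
          List.drop_succ_cons]
      · -- no flush: user joins the open batch
        rw [batchQueriesLoop]
        simp only [hnum]
        rw [if_neg (by
          simp only [List.length_cons]
          push_cast
          intro h
          rcases h with h | h
          · exact hfl h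
          · omega)]
        rw [ih (o ++ pvFragment user) qs (t + 1) (by simp) (by omega) (by omega)]
        have hk : (batch_size - t).toNat = (batch_size - (t + 1)).toNat + 1 := by omega
        simp [hk, pvFrags, String.append_assoc]

-- ===== VERDICT (by name: the statement is the Claim_ definition above) =====
theorem batch_queries_spec : Claim_equal_batch_queries := by
  intro users batch_size _
  unfold Spec_batch_queries batch_queries batch_queries_alt
  cases users with
  | nil => simp [batchQueriesLoop]
  | cons user tail =>
    by_cases hbs : 0 < batch_size
    · rw [loop_pos batch_size hbs (user :: tail) "" [] 0 (by simp) le_rfl hbs]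
      rw [if_neg (by simp), if_pos hbs]
      have hs : (batch_size - 0).toNat = batch_size.toNat - 1 + 1 := by omega
      rw [hs, chunks_cons]
      simp [List.drop_succ_cons]
    · rw [loop_nonpos batch_size (by omega) (user :: tail) "" [] 0 (by simp) le_rfl]
      rw [if_neg (by simp), if_neg hbs]
      rw [batchQueriesChunks]
      have h1 : (user :: tail).length - 1 + 1 = (user :: tail).length := by simp
      have htake : ((user :: tail).take ((user :: tail).length - 1 + 1)) = user :: tail := by
        rw [h1]; exact List.take_length
      have hdrop : (tail.drop ((user :: tail).length - 1)) = [] := by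
        apply List.drop_eq_nil_of_le; simp
      rw [htake, hdrop, batchQueriesChunks]
      simp
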